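-- pv_equiv track=rewrite | github.com/abjugard/advent-of-code-2020 | src/day21-allergen_assessment.py | find_inert_ingredients
-- ===== SOURCE A (Python) =====
-- from collections import defaultdict
--
-- def present(a_foods, i_foods):
--   return all(a_food in i_foods for a_food in a_foods)
--
-- def find_inert_ingredients(foods):
--   ingredient_map = defaultdict(set)
--   allergen_map = defaultdict(set)
--   for idx, (ingredients, allergens) in enumerate(foods):
--     for ingredient in ingredients:
--       ingredient_map[ingredient].add(idx)
--     for allergen in allergens:
--       allergen_map[allergen].add(idx)
--
--   non_allergen_used = 0
--   inert_ingredients = set()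
--   for ingredient, i_foods in ingredient_map.items():
--     if any(present(a_foods, i_foods) for a_foods in allergen_map.values()):
--       continue
--     inert_ingredients.add(ingredient)
--     non_allergen_used += len(i_foods)
--   return non_allergen_used, inert_ingredients
-- ===== SOURCE B (Python) =====
-- def find_inert_ingredients(foods):
--   # Per allergen, intersect the ingredient-sets of the foods that list it;
--   # anything in some intersection is suspicious, the rest is inert.
--   candidates = {}
--   occurrences = {}
--   for ingredients, allergens in foods:
--     ing_set = set(ingredients)
--     for ingredient in ing_set:
--       occurrences[ingredient] = occurrences.get(ingredient, 0) + 1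
--     for allergen in allergens:
--       if allergen in candidates:
--         candidates[allergen] = candidates[allergen] & ing_set
--       else:
--         candidates[allergen] = set(ing_set)
--   suspicious = set()
--   for cand in candidates.values():
--     suspicious |= cand
--   inert = {ing for ing in occurrences if ing not in suspicious}
--   return sum(occurrences[ing] for ing in inert), inert
-- ===== Notes on version B (the rewrite author's own statement) =====
-- stated objective: faster
-- what changed: A tests every ingredient against every allergen's food-index set (subset tests over index sets); B instead intersects, per allergen, the ingredient sets of the foods listing it, unions these candidate sets into one 'suspicious' set, and counts distinct-per-food occurrences in the same single pass, so the per-ingredient-times-per-allergen subset scan disappears.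
import Mathlib
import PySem

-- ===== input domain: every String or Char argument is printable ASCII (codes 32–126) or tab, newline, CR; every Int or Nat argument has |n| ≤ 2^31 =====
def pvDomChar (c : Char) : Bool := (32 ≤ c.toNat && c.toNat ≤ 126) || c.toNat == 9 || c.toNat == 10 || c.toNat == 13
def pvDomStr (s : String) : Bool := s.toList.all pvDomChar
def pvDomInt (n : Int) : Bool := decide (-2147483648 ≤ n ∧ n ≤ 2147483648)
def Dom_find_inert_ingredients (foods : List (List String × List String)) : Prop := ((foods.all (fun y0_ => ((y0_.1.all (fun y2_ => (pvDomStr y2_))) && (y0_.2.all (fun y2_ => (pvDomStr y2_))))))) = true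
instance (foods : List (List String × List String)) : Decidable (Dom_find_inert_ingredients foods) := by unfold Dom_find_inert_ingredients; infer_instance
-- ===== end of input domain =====

-- B replaces A's per-ingredient scan over all allergen index-sets by one per-allergen
-- intersection of ingredient sets (objective: faster, O(total tokens · cost) vs O(I·A·F)).

-- ===== PORT A =====
def pvPresent (a_foods : PySem.Set Int) (i_foods : PySem.Set Int) : Bool :=
  a_foods.all (fun a_food => PySem.Set.contains i_foods a_food)

def find_inert_ingredients (foods : List (List String × List String)) : Int × List String :=
  let maps := (PySem.List.enumerate foods).foldl
    (fun (maps : PySem.Dict String (PySem.Set Int) × PySem.Dict String (PySem.Set Int)) p =>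
      (p.2.1.foldl (fun d ingredient => d.modify ingredient PySem.Set.empty (fun s => PySem.Set.add s p.1)) maps.1,
       p.2.2.foldl (fun d allergen => d.modify allergen PySem.Set.empty (fun s => PySem.Set.add s p.1)) maps.2))
    (PySem.Dict.empty, PySem.Dict.empty)
  maps.1.items.foldl
    (fun acc q =>
      if (maps.2.values).any (fun a_foods => pvPresent a_foods q.2) then acc
      else (acc.1 + PySem.Set.len q.2, PySem.Set.add acc.2 q.1))
    (0, PySem.Set.empty)

-- ===== PORT B =====
def find_inert_ingredients_alt (foods : List (List String × List String)) : Int × List String :=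
  let st := foods.foldl
    (fun (st : PySem.Dict String (PySem.Set String) × PySem.Dict String Int) f =>
      let ing_set := PySem.Set.ofList f.1
      (f.2.foldl
        (fun d allergen =>
          if d.contains allergen then
            d.insert allergen (PySem.Set.inter (d.getD allergen PySem.Set.empty) ing_set)
          else d.insert allergen (PySem.Set.ofList ing_set)) st.1,
       ing_set.foldl (fun d ingredient => d.insert ingredient (d.getD ingredient 0 + 1)) st.2))
    (PySem.Dict.empty, PySem.Dict.empty)
  let suspicious := st.1.values.foldl (fun s cand => PySem.Set.union s cand) PySem.Set.empty
  let inert := st.2.keys.filter (fun ingredient => !(PySem.Set.contains suspicious ingredient))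
  ((inert.map (fun ingredient => st.2.getD ingredient 0)).sum, inert)

-- ===== PRECONDITION & SPEC =====
def Spec_find_inert_ingredients (foods : List (List String × List String)) (out : Int × List String) : Prop := out = find_inert_ingredients_alt foods
instance (foods : List (List String × List String)) (out : Int × List String) : Decidable (Spec_find_inert_ingredients foods out) := by unfold Spec_find_inert_ingredients; infer_instance

-- ===== CLAIM (what is proved, stated in full; the proofs are below) =====
def Claim_equal_find_inert_ingredients : Prop := ∀ (foods : List (List String × List String)), Dom_find_inert_ingredients foods → Spec_find_inert_ingredients foods (find_inert_ingredients foods)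

-- ===== LEMMAS AND PROOFS =====

-- fold-step abbreviations used only by the proofs
def pvIngFold (d : PySem.Dict String (PySem.Set Int)) (p : Int × (List String × List String)) :
    PySem.Dict String (PySem.Set Int) :=
  p.2.1.foldl (fun d ingredient => d.modify ingredient PySem.Set.empty (fun s => PySem.Set.add s p.1)) d

def pvAllFold (d : PySem.Dict String (PySem.Set Int)) (p : Int × (List String × List String)) :
    PySem.Dict String (PySem.Set Int) :=
  p.2.2.foldl (fun d allergen => d.modify allergen PySem.Set.empty (fun s => PySem.Set.add s p.1)) d

def pvCandFold (d : PySem.Dict String (PySem.Set String)) (f : List String × List String) :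
    PySem.Dict String (PySem.Set String) :=
  f.2.foldl
    (fun d allergen =>
      if d.contains allergen then
        d.insert allergen (PySem.Set.inter (d.getD allergen PySem.Set.empty) (PySem.Set.ofList f.1))
      else d.insert allergen (PySem.Set.ofList (PySem.Set.ofList f.1))) d

def pvOccFold (d : PySem.Dict String Int) (f : List String × List String) : PySem.Dict String Int :=
  (PySem.Set.ofList f.1).foldl (fun d ingredient => d.insert ingredient (d.getD ingredient 0 + 1)) d

lemma pv_split_A (L : List (Int × (List String × List String)))
    (d1 d2 : PySem.Dict String (PySem.Set Int)) :
    L.foldl (fun (maps : PySem.Dict String (PySem.Set Int) × PySem.Dict String (PySem.Set Int)) p =>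
        (p.2.1.foldl (fun d ingredient => d.modify ingredient PySem.Set.empty (fun s => PySem.Set.add s p.1)) maps.1,
         p.2.2.foldl (fun d allergen => d.modify allergen PySem.Set.empty (fun s => PySem.Set.add s p.1)) maps.2)) (d1, d2)
      = (L.foldl pvIngFold d1, L.foldl pvAllFold d2) := by
  induction L generalizing d1 d2 with
  | nil => rfl
  | cons p ps ih => simp only [List.foldl_cons, ih, pvIngFold, pvAllFold]

lemma pv_split_B (L : List (List String × List String))
    (d1 : PySem.Dict String (PySem.Set String)) (d2 : PySem.Dict String Int) :
    L.foldl (fun (st : PySem.Dict String (PySem.Set String) × PySem.Dict String Int) f =>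
        (f.2.foldl (fun d allergen =>
            if d.contains allergen then
              d.insert allergen (PySem.Set.inter (d.getD allergen PySem.Set.empty) (PySem.Set.ofList f.1))
            else d.insert allergen (PySem.Set.ofList (PySem.Set.ofList f.1))) st.1,
         (PySem.Set.ofList f.1).foldl (fun d ingredient => d.insert ingredient (d.getD ingredient 0 + 1)) st.2)) (d1, d2)
      = (L.foldl pvCandFold d1, L.foldl pvOccFold d2) := by
  induction L generalizing d1 d2 with
  | nil => rfl
  | cons f fs ih => simp only [List.foldl_cons, ih, pvCandFold, pvOccFold]


lemma pv_inner_getD (l : List String) (i : Int) (d : PySem.Dict String (PySem.Set Int)) (x : String) :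
    (l.foldl (fun d y => d.modify y PySem.Set.empty (fun s => PySem.Set.add s i)) d).getD x PySem.Set.empty
      = if x ∈ l then PySem.Set.add (d.getD x PySem.Set.empty) i else d.getD x PySem.Set.empty := by
  induction l generalizing d with
  | nil => simp
  | cons y ys ih =>
    simp only [List.foldl_cons, ih, PySem.Dict.getD_modify]
    by_cases hx : x = y <;> by_cases hm : x ∈ ys <;> simp [hx, hm]

lemma pv_enum_fst_nodup (foods : List (List String × List String)) (s : Int) :
    ((PySem.List.enumerate foods s).map (·.1)).Nodup := by
  have h := PySem.List.pairwise_lt_enumerate foods s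
  simp only [List.Nodup, List.pairwise_map]
  exact h.imp (fun hlt => ne_of_lt hlt)

lemma pv_foldl_enumerate_snd {β : Type} (foods : List (List String × List String))
    (g : β → (List String × List String) → β) (a : β) (s : Int) :
    (PySem.List.enumerate foods s).foldl (fun acc p => g acc p.2) a = foods.foldl g a := by
  induction foods generalizing a s with
  | nil => simp [PySem.List.enumerate_nil]
  | cons f fs ih => simp [PySem.List.enumerate_cons, ih]

lemma pv_countP_enumerate (foods : List (List String × List String))
    (q : (List String × List String) → Bool) (s : Int) :
    ((PySem.List.enumerate foods s).countP (fun p => q p.2)) = foods.countP q := by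
  induction foods generalizing s with
  | nil => simp [PySem.List.enumerate_nil]
  | cons f fs ih => simp [PySem.List.enumerate_cons, List.countP_cons, ih]

lemma pv_mem_enumerate_snd (foods : List (List String × List String)) (s : Int)
    (f : List String × List String) :
    (∃ p ∈ PySem.List.enumerate foods s, p.2 = f) ↔ f ∈ foods := by
  constructor
  · rintro ⟨p, hp, rfl⟩
    have := PySem.List.map_snd_enumerate foods s
    rw [← this]; exact List.mem_map_of_mem hp
  · intro hf
    have := PySem.List.map_snd_enumerate foods s
    rw [← this] at hf
    obtain ⟨p, hp, hpe⟩ := List.mem_map.1 hf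
    exact ⟨p, hp, hpe⟩

lemma pv_idx_getD (L : List (Int × (List String × List String)))
    (sel : List String × List String → List String)
    (d : PySem.Dict String (PySem.Set Int)) (x : String)
    (hfresh : ∀ p ∈ L, p.1 ∉ d.getD x PySem.Set.empty)
    (hnd : (L.map (·.1)).Nodup) :
    (L.foldl (fun d p => (sel p.2).foldl
        (fun d y => d.modify y PySem.Set.empty (fun s => PySem.Set.add s p.1)) d) d).getD x PySem.Set.empty
      = d.getD x PySem.Set.empty ++ (L.filter (fun p => decide (x ∈ sel p.2))).map (·.1) := by
  induction L generalizing d with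
  | nil => simp
  | cons p ps ih =>
    simp only [List.map_cons, List.nodup_cons] at hnd
    simp only [List.foldl_cons]
    set d' := (sel p.2).foldl (fun d y => d.modify y PySem.Set.empty (fun s => PySem.Set.add s p.1)) d with hd'
    have hgd' : d'.getD x PySem.Set.empty
        = if x ∈ sel p.2 then PySem.Set.add (d.getD x PySem.Set.empty) p.1 else d.getD x PySem.Set.empty :=
      pv_inner_getD _ _ _ _
    have hadd : x ∈ sel p.2 → d'.getD x PySem.Set.empty = d.getD x PySem.Set.empty ++ [p.1] := by
      intro h
      rw [hgd', if_pos h, PySem.Set.add_of_not_mem (hfresh p (by simp))]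
    have hfresh' : ∀ q ∈ ps, q.1 ∉ d'.getD x PySem.Set.empty := by
      intro q hq
      have hne : q.1 ≠ p.1 := by
        intro he; exact hnd.1 (he ▸ List.mem_map_of_mem hq)
      rw [hgd']
      split
      · rw [PySem.Set.add_of_not_mem (hfresh p (by simp))]
        intro hm
        rcases List.mem_append.1 hm with h1 | h1
        · exact hfresh q (by simp [hq]) h1
        · exact hne (by simpa using h1)
      · exact hfresh q (by simp [hq])
    rw [ih d' hfresh' hnd.2, hgd']
    by_cases hm : x ∈ sel p.2
    · rw [if_pos hm, PySem.Set.add_of_not_mem (hfresh p (by simp))]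
      simp [hm]
    · simp [hm]

lemma pv_keys_fold (L : List (Int × (List String × List String)))
    (sel : List String × List String → List String) (d : PySem.Dict String (PySem.Set Int)) :
    (L.foldl (fun d p => (sel p.2).foldl
        (fun d y => d.modify y PySem.Set.empty (fun s => PySem.Set.add s p.1)) d) d).keys
      = L.foldl (fun ks p => PySem.Set.update ks (sel p.2)) d.keys := by
  induction L generalizing d with
  | nil => rfl
  | cons p ps ih =>
    simp only [List.foldl_cons]
    rw [ih]
    rw [PySem.Dict.keys_foldl_modify (f := fun _ _ s => PySem.Set.add s p.1)]

lemma pv_keys_occ (foods : List (List String × List String)) (d : PySem.Dict String Int) :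
    (foods.foldl (fun d f => (PySem.Set.ofList f.1).foldl
        (fun d ingredient => d.insert ingredient (d.getD ingredient 0 + 1)) d) d).keys
      = foods.foldl (fun ks f => PySem.Set.update ks f.1) d.keys := by
  induction foods generalizing d with
  | nil => rfl
  | cons f fs ih =>
    simp only [List.foldl_cons]
    rw [ih, PySem.Dict.keys_foldl_insert (f := fun d x => d.getD x 0 + 1)]
    congr 1
    rw [PySem.Set.update_eq_append_filter, PySem.Set.update_eq_append_filter, PySem.Set.ofList_ofList]

lemma pv_nodup_fold_update {γ : Type} [BEq γ] [LawfulBEq γ] {β : Type} (L : List β) (sel : β → List γ)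
    (ks : PySem.Set γ) (h : List.Nodup ks) : List.Nodup (L.foldl (fun ks p => PySem.Set.update ks (sel p)) ks) := by
  induction L generalizing ks with
  | nil => exact h
  | cons p ps ih => exact ih _ (PySem.Set.nodup_update _ _ h)

lemma pv_mem_fold_update {γ : Type} [BEq γ] [LawfulBEq γ] {β : Type} (L : List β) (sel : β → List γ)
    (ks : PySem.Set γ) (x : γ) :
    x ∈ L.foldl (fun ks p => PySem.Set.update ks (sel p)) ks ↔ x ∈ ks ∨ ∃ p ∈ L, x ∈ sel p := by
  induction L generalizing ks with
  | nil => simp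
  | cons p ps ih =>
    simp only [List.foldl_cons, ih, PySem.Set.mem_update]
    constructor
    · rintro (⟨h | h⟩ | ⟨q, hq, hxq⟩)
      · exact Or.inl h
      · exact Or.inr ⟨p, by simp, h⟩
      · exact Or.inr ⟨q, by simp [hq], hxq⟩
    · rintro (h | ⟨q, hq, hxq⟩)
      · exact Or.inl (Or.inl h)
      · rcases List.mem_cons.1 hq with rfl | hq
        · exact Or.inl (Or.inr hxq)
        · exact Or.inr ⟨q, hq, hxq⟩


lemma pv_cand_inner_contains (al : List String) (S : PySem.Set String)
    (d : PySem.Dict String (PySem.Set String)) (a : String) :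
    (al.foldl (fun d b => if d.contains b then
        d.insert b (PySem.Set.inter (d.getD b PySem.Set.empty) S)
      else d.insert b (PySem.Set.ofList S)) d).contains a = (decide (a ∈ al) || d.contains a) := by
  induction al generalizing d with
  | nil => simp
  | cons b bs ih =>
    simp only [List.foldl_cons, ih]
    by_cases hab : a = b
    · subst hab
      split <;> simp [PySem.Dict.contains_insert]
    · have hf : (a == b) = false := beq_eq_false_iff_ne.2 hab
      split <;> simp [PySem.Dict.contains_insert, hf, hab]

lemma pv_cand_inner_mem (al : List String) (S : PySem.Set String)
    (d : PySem.Dict String (PySem.Set String)) (a : String) (x : String) :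
    (x ∈ (al.foldl (fun d b => if d.contains b then
        d.insert b (PySem.Set.inter (d.getD b PySem.Set.empty) S)
      else d.insert b (PySem.Set.ofList S)) d).getD a PySem.Set.empty)
    ↔ (if a ∈ al then ((x ∈ d.getD a PySem.Set.empty ∨ d.contains a = false) ∧ x ∈ S)
       else x ∈ d.getD a PySem.Set.empty) := by
  induction al generalizing d with
  | nil => simp
  | cons b bs ih =>
    simp only [List.foldl_cons, ih]
    by_cases hab : a = b
    · subst hab
      by_cases hc : d.contains a
      · rw [if_pos hc]
        by_cases hm : a ∈ bs <;>
          simp [hm, PySem.Dict.getD_insert_self, PySem.Dict.contains_insert_self,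
            PySem.Set.inter, List.mem_filter, hc]
      · rw [if_neg (show ¬ (d.contains a = true) by simp [hc])]
        have hd : d.getD a PySem.Set.empty = PySem.Set.empty :=
          PySem.Dict.getD_of_not_contains _ _ (by simpa using hc)
        by_cases hm : a ∈ bs <;>
          simp [hm, PySem.Dict.getD_insert_self, PySem.Dict.contains_insert_self,
            PySem.Set.mem_ofList, hc, PySem.Set.empty]
    · have hgd : ∀ v w, ((if d.contains b then d.insert b v else d.insert b w).getD a PySem.Set.empty)
          = d.getD a PySem.Set.empty := by
        intro v w; split <;> exact PySem.Dict.getD_insert_of_ne _ _ _ hab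
      have hcc : ∀ v w, ((if d.contains b then d.insert b v else d.insert b w).contains a)
          = d.contains a := by
        intro v w
        have hf : (a == b) = false := beq_eq_false_iff_ne.2 hab
        split <;> simp [PySem.Dict.contains_insert, hf]
      rw [hgd, hcc]
      simp [List.mem_cons, hab]

lemma pv_cand_contains (foods : List (List String × List String))
    (d : PySem.Dict String (PySem.Set String)) (a : String) :
    (foods.foldl pvCandFold d).contains a = (decide (∃ f ∈ foods, a ∈ f.2) || d.contains a) := by
  induction foods generalizing d with
  | nil => simp
  | cons f fs ih =>
    simp only [List.foldl_cons, ih, pvCandFold, pv_cand_inner_contains]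
    by_cases h1 : a ∈ f.2 <;> by_cases h2 : ∃ g ∈ fs, a ∈ g.2 <;>
      simp [h1, h2, List.mem_cons]

lemma pv_cand_mem (foods : List (List String × List String))
    (d : PySem.Dict String (PySem.Set String)) (a : String) (x : String) :
    (x ∈ (foods.foldl pvCandFold d).getD a PySem.Set.empty)
    ↔ ((x ∈ d.getD a PySem.Set.empty ∨ (d.contains a = false ∧ ∃ f ∈ foods, a ∈ f.2))
        ∧ ∀ f ∈ foods, a ∈ f.2 → x ∈ f.1) := by
  induction foods generalizing d with
  | nil => simp
  | cons f fs ih =>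
    simp only [List.foldl_cons, ih, pvCandFold]
    rw [pv_cand_inner_mem, pv_cand_inner_contains]
    by_cases h1 : a ∈ f.2
    · rw [if_pos h1]
      have hcd : d.getD a PySem.Set.empty = PySem.Set.empty ∨ d.contains a = true := by
        by_cases hc : d.contains a
        · exact Or.inr hc
        · exact Or.inl (PySem.Dict.getD_of_not_contains _ _ (by simpa using hc))
      by_cases hc : d.contains a <;>
        simp [h1, hc, PySem.Set.mem_ofList, List.forall_mem_cons] <;> tauto
    · rw [if_neg h1]
      simp only [h1, List.forall_mem_cons, List.exists_mem_cons_iff]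
      tauto

lemma pv_occ_getD (foods : List (List String × List String)) (d : PySem.Dict String Int) (x : String) :
    (foods.foldl (fun d f => (PySem.Set.ofList f.1).foldl
        (fun d ingredient => d.insert ingredient (d.getD ingredient 0 + 1)) d) d).getD x 0
      = d.getD x 0 + (foods.countP (fun f => decide (x ∈ f.1)) : Int) := by
  induction foods generalizing d with
  | nil => simp
  | cons f fs ih =>
    simp only [List.foldl_cons, ih, PySem.Dict.getD_foldl_insert_add_one, List.countP_cons]
    have hcount : (PySem.Set.ofList f.1).count x = if x ∈ f.1 then 1 else 0 := by
      by_cases hm : x ∈ f.1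
      · rw [if_pos hm]
        exact List.count_eq_one_of_mem (PySem.Set.nodup_ofList f.1) ((PySem.Set.mem_ofList _ _).2 hm)
      · rw [if_neg hm]
        exact List.count_eq_zero_of_not_mem (fun h => hm ((PySem.Set.mem_ofList _ _).1 h))
    by_cases hm : x ∈ f.1 <;> simp [hcount, hm] <;> omega

lemma pv_mem_foldl_union (l : List (PySem.Set String)) (s : PySem.Set String) (x : String) :
    x ∈ l.foldl (fun s t => PySem.Set.union s t) s ↔ x ∈ s ∨ ∃ t ∈ l, x ∈ t := by
  induction l generalizing s with
  | nil => simp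
  | cons t ts ih =>
    simp only [List.foldl_cons, ih, PySem.Set.mem_union, List.exists_mem_cons_iff]
    tauto

lemma pv_cand_step_eq (d : PySem.Dict String (PySem.Set String)) (f : List String × List String) :
    pvCandFold d f = f.2.foldl (fun d a => d.insert a
      (if d.contains a then PySem.Set.inter (d.getD a PySem.Set.empty) (PySem.Set.ofList f.1)
       else PySem.Set.ofList (PySem.Set.ofList f.1))) d := by
  unfold pvCandFold
  congr 1
  funext d a
  exact (apply_ite (d.insert a) _ _ _).symm

lemma pv_nodup_keys_cand (foods : List (List String × List String))
    (d : PySem.Dict String (PySem.Set String)) (h : d.keys.Nodup) :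
    (foods.foldl pvCandFold d).keys.Nodup := by
  induction foods generalizing d with
  | nil => exact h
  | cons f fs ih =>
    refine ih _ ?_
    rw [pv_cand_step_eq]
    exact PySem.Dict.nodup_keys_foldl_insert _ _ _ h


lemma pv_phase2 (items : List (String × PySem.Set Int)) (P : String × PySem.Set Int → Bool)
    (c0 : Int) (s0 : PySem.Set String)
    (hfresh : ∀ q ∈ items, q.1 ∉ s0) (hnd : (items.map (·.1)).Nodup) :
    items.foldl (fun acc q => if P q then acc
        else (acc.1 + PySem.Set.len q.2, PySem.Set.add acc.2 q.1)) (c0, s0)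
      = (c0 + ((items.filter (fun q => !P q)).map (fun q => PySem.Set.len q.2)).sum,
         s0 ++ (items.filter (fun q => !P q)).map (·.1)) := by
  induction items generalizing c0 s0 with
  | nil => simp
  | cons q qs ih =>
    simp only [List.map_cons, List.nodup_cons] at hnd
    simp only [List.foldl_cons]
    by_cases hp : P q
    · rw [if_pos hp, ih c0 s0 (fun r hr => hfresh r (by simp [hr])) hnd.2]
      simp [hp]
    · rw [if_neg hp]
      have hq1 : q.1 ∉ s0 := hfresh q (by simp)
      rw [PySem.Set.add_of_not_mem hq1]
      have hfresh' : ∀ r ∈ qs, r.1 ∉ s0 ++ [q.1] := by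
        intro r hr hm
        rcases List.mem_append.1 hm with h1 | h1
        · exact hfresh r (by simp [hr]) h1
        · exact hnd.1 ((by simpa using h1) ▸ List.mem_map_of_mem hr)
      rw [ih _ _ hfresh' hnd.2]
      simp [hp, add_assoc]

lemma pv_subset_iff (L : List (Int × (List String × List String)))
    (hnd : (L.map (·.1)).Nodup) (a x : String) :
    (∀ j ∈ (L.filter (fun p => decide (a ∈ p.2.2))).map (·.1),
        j ∈ (L.filter (fun p => decide (x ∈ p.2.1))).map (·.1))
    ↔ ∀ p ∈ L, a ∈ p.2.2 → x ∈ p.2.1 := by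
  constructor
  · intro h p hp ha
    have hj : p.1 ∈ (L.filter (fun p => decide (a ∈ p.2.2))).map (·.1) :=
      List.mem_map_of_mem (List.mem_filter.2 ⟨hp, by simpa using ha⟩)
    obtain ⟨q, hq, hqe⟩ := List.mem_map.1 (h _ hj)
    have hq' := List.mem_filter.1 hq
    have : q = p := List.inj_on_of_nodup_map hnd hq'.1 hp hqe
    exact this ▸ (by simpa using hq'.2)
  · intro h j hj
    obtain ⟨q, hq, hqe⟩ := List.mem_map.1 hj
    have hq' := List.mem_filter.1 hq
    exact hqe ▸ List.mem_map_of_mem (List.mem_filter.2 ⟨hq'.1, by simpa using h q hq'.1 (by simpa using hq'.2)⟩)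


lemma pv_snd_mem_enumerate (foods : List (List String × List String)) (s : Int)
    (p : Int × (List String × List String)) (hp : p ∈ PySem.List.enumerate foods s) : p.2 ∈ foods := by
  rw [← PySem.List.map_snd_enumerate foods s]
  exact List.mem_map_of_mem hp

lemma pv_forall_enumerate_snd (foods : List (List String × List String)) (s : Int)
    (Q : (List String × List String) → Prop) :
    (∀ p ∈ PySem.List.enumerate foods s, Q p.2) ↔ ∀ f ∈ foods, Q f := by
  constructor
  · intro h f hf
    obtain ⟨p, hp, hpe⟩ := (pv_mem_enumerate_snd foods s f).2 hf
    exact hpe ▸ h p hp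
  · intro h p hp
    exact h p.2 (pv_snd_mem_enumerate foods s p hp)

lemma pv_exists_enumerate_snd (foods : List (List String × List String)) (s : Int)
    (Q : (List String × List String) → Prop) :
    (∃ p ∈ PySem.List.enumerate foods s, Q p.2) ↔ ∃ f ∈ foods, Q f := by
  constructor
  · rintro ⟨p, hp, hq⟩
    exact ⟨p.2, pv_snd_mem_enumerate foods s p hp, hq⟩
  · rintro ⟨f, hf, hq⟩
    obtain ⟨p, hp, hpe⟩ := (pv_mem_enumerate_snd foods s f).2 hf
    exact ⟨p, hp, hpe ▸ hq⟩

-- the two inert-ingredient predicates agree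
lemma pv_pred_eq (foods : List (List String × List String)) (k : String) :
    (((PySem.List.enumerate foods 0).foldl pvAllFold PySem.Dict.empty).values.any
        (fun af => pvPresent af (((PySem.List.enumerate foods 0).foldl pvIngFold PySem.Dict.empty).getD k PySem.Set.empty)))
      = PySem.Set.contains
          ((foods.foldl pvCandFold PySem.Dict.empty).values.foldl (fun s t => PySem.Set.union s t) PySem.Set.empty) k := by
  have hndfst := pv_enum_fst_nodup foods 0
  have eAm : (PySem.List.enumerate foods 0).foldl pvAllFold PySem.Dict.empty
      = (PySem.List.enumerate foods 0).foldl (fun d p => p.2.2.foldl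
          (fun d y => d.modify y PySem.Set.empty (fun s => PySem.Set.add s p.1)) d) PySem.Dict.empty := rfl
  have hndam : ((PySem.List.enumerate foods 0).foldl pvAllFold PySem.Dict.empty).keys.Nodup := by
    rw [eAm, pv_keys_fold _ (fun f => f.2) PySem.Dict.empty, PySem.Dict.keys_empty]
    exact pv_nodup_fold_update _ _ _ List.nodup_nil
  have hndcand : (foods.foldl pvCandFold PySem.Dict.empty).keys.Nodup :=
    pv_nodup_keys_cand foods PySem.Dict.empty (by simp)
  have hkeysAm : ∀ a, a ∈ ((PySem.List.enumerate foods 0).foldl pvAllFold PySem.Dict.empty).keys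
      ↔ ∃ f ∈ foods, a ∈ f.2 := by
    intro a
    rw [eAm, pv_keys_fold _ (fun f => f.2) PySem.Dict.empty, PySem.Dict.keys_empty,
      pv_mem_fold_update (PySem.List.enumerate foods 0) (fun p : Int × (List String × List String) => p.2.2) [] a]
    simp only [List.not_mem_nil, false_or]
    exact pv_exists_enumerate_snd foods 0 (fun f => a ∈ f.2)
  have ham : ∀ a, ((PySem.List.enumerate foods 0).foldl pvAllFold PySem.Dict.empty).getD a PySem.Set.empty
      = ((PySem.List.enumerate foods 0).filter (fun p => decide (a ∈ p.2.2))).map (·.1) := by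
    intro a
    have := pv_idx_getD (PySem.List.enumerate foods 0) (fun f => f.2) PySem.Dict.empty a (by simp) hndfst
    simpa using this
  have him : ∀ x, ((PySem.List.enumerate foods 0).foldl pvIngFold PySem.Dict.empty).getD x PySem.Set.empty
      = ((PySem.List.enumerate foods 0).filter (fun p => decide (x ∈ p.2.1))).map (·.1) := by
    intro x
    have := pv_idx_getD (PySem.List.enumerate foods 0) (fun f => f.1) PySem.Dict.empty x (by simp) hndfst
    simpa using this
  rw [Bool.eq_iff_iff]
  constructor
  · intro h
    obtain ⟨af, haf, hall⟩ := List.any_eq_true.1 h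
    rw [PySem.Dict.values_eq_map_keys _ hndam PySem.Set.empty] at haf
    obtain ⟨a, ha, rfl⟩ := List.mem_map.1 haf
    have hex : ∃ f ∈ foods, a ∈ f.2 := (hkeysAm a).1 ha
    have hall' : ∀ f ∈ foods, a ∈ f.2 → k ∈ f.1 := by
      rw [← pv_forall_enumerate_snd foods 0 (fun f => a ∈ f.2 → k ∈ f.1)]
      rw [← pv_subset_iff _ hndfst a k]
      intro j hj
      simp only [pvPresent, List.all_eq_true] at hall
      have := hall j (by rw [ham a]; exact hj)
      rw [PySem.Set.contains_iff, him k] at this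
      exact this
    rw [PySem.Set.contains_iff, pv_mem_foldl_union]
    refine Or.inr ?_
    rw [PySem.Dict.values_eq_map_keys _ hndcand PySem.Set.empty]
    refine ⟨(foods.foldl pvCandFold PySem.Dict.empty).getD a PySem.Set.empty,
      List.mem_map_of_mem ?_, ?_⟩
    · rw [← PySem.Dict.contains_iff_mem_keys, pv_cand_contains]
      simp [hex]
    · rw [pv_cand_mem]
      simp only [PySem.Dict.getD_empty, PySem.Dict.contains_empty]
      exact ⟨Or.inr ⟨trivial, hex⟩, hall'⟩
  · intro h
    rw [PySem.Set.contains_iff, pv_mem_foldl_union] at h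
    rcases h with h | ⟨t, ht, hkt⟩
    · simp [PySem.Set.empty] at h
    rw [PySem.Dict.values_eq_map_keys _ hndcand PySem.Set.empty] at ht
    obtain ⟨a, ha, rfl⟩ := List.mem_map.1 ht
    rw [pv_cand_mem] at hkt
    simp only [PySem.Dict.getD_empty, PySem.Dict.contains_empty] at hkt
    obtain ⟨hex, hall⟩ := hkt
    have hex' : ∃ f ∈ foods, a ∈ f.2 := by
      rcases hex with h | ⟨_, h⟩
      · simp [PySem.Set.empty] at h
      · exact h
    rw [List.any_eq_true]
    rw [PySem.Dict.values_eq_map_keys _ hndam PySem.Set.empty]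
    refine ⟨((PySem.List.enumerate foods 0).foldl pvAllFold PySem.Dict.empty).getD a PySem.Set.empty,
      List.mem_map_of_mem ((hkeysAm a).2 hex'), ?_⟩
    simp only [pvPresent, List.all_eq_true]
    intro j hj
    rw [PySem.Set.contains_iff, him k]
    rw [ham a] at hj
    revert j
    rw [show (∀ j, j ∈ ((PySem.List.enumerate foods 0).filter (fun p => decide (a ∈ p.2.2))).map (·.1)
          → j ∈ ((PySem.List.enumerate foods 0).filter (fun p => decide (k ∈ p.2.1))).map (·.1))
        = (∀ j ∈ ((PySem.List.enumerate foods 0).filter (fun p => decide (a ∈ p.2.2))).map (·.1),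
          j ∈ ((PySem.List.enumerate foods 0).filter (fun p => decide (k ∈ p.2.1))).map (·.1)) from rfl]
    rw [pv_subset_iff _ hndfst a k, pv_forall_enumerate_snd foods 0 (fun f => a ∈ f.2 → k ∈ f.1)]
    exact hall

-- the two per-ingredient counts agree
lemma pv_len_eq (foods : List (List String × List String)) (k : String) :
    PySem.Set.len (((PySem.List.enumerate foods 0).foldl pvIngFold PySem.Dict.empty).getD k PySem.Set.empty)
      = (foods.foldl pvOccFold PySem.Dict.empty).getD k 0 := by
  have hndfst := pv_enum_fst_nodup foods 0
  have him := pv_idx_getD (PySem.List.enumerate foods 0) (fun f => f.1) PySem.Dict.empty k (by simp) hndfst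
  have e : foods.foldl pvOccFold PySem.Dict.empty
      = foods.foldl (fun d f => (PySem.Set.ofList f.1).foldl
          (fun d ingredient => d.insert ingredient (d.getD ingredient 0 + 1)) d) PySem.Dict.empty := rfl
  rw [e, pv_occ_getD, PySem.Dict.getD_empty]
  simp only [PySem.Set.len]
  rw [show ((PySem.List.enumerate foods 0).foldl pvIngFold PySem.Dict.empty)
      = ((PySem.List.enumerate foods 0).foldl (fun d p => p.2.1.foldl
          (fun d y => d.modify y PySem.Set.empty (fun s => PySem.Set.add s p.1)) d) PySem.Dict.empty) from rfl]
  rw [show ((PySem.List.enumerate foods 0).foldl (fun d p => p.2.1.foldl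
          (fun d y => d.modify y PySem.Set.empty (fun s => PySem.Set.add s p.1)) d) PySem.Dict.empty).getD k PySem.Set.empty
      = PySem.Dict.empty.getD k PySem.Set.empty
        ++ ((PySem.List.enumerate foods 0).filter (fun p => decide (k ∈ p.2.1))).map (·.1) from by simpa using him]
  simp only [PySem.Dict.getD_empty, PySem.Set.empty, List.nil_append, List.length_map,
    ← List.countP_eq_length_filter]
  rw [pv_countP_enumerate foods (fun f => decide (k ∈ f.1)) 0]
  simp

-- keys of the two ingredient dicts agree
lemma pv_keys_eq (foods : List (List String × List String)) :
    ((PySem.List.enumerate foods 0).foldl pvIngFold PySem.Dict.empty).keys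
      = (foods.foldl pvOccFold PySem.Dict.empty).keys := by
  rw [show ((PySem.List.enumerate foods 0).foldl pvIngFold PySem.Dict.empty)
      = ((PySem.List.enumerate foods 0).foldl (fun d p => p.2.1.foldl
          (fun d y => d.modify y PySem.Set.empty (fun s => PySem.Set.add s p.1)) d) PySem.Dict.empty) from rfl]
  rw [show (foods.foldl pvOccFold PySem.Dict.empty)
      = (foods.foldl (fun d f => (PySem.Set.ofList f.1).foldl
          (fun d ingredient => d.insert ingredient (d.getD ingredient 0 + 1)) d) PySem.Dict.empty) from rfl]
  rw [pv_keys_fold _ (fun f => f.1) PySem.Dict.empty, pv_keys_occ foods PySem.Dict.empty]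
  rw [PySem.Dict.keys_empty]
  exact pv_foldl_enumerate_snd foods (fun ks f => PySem.Set.update ks f.1) [] 0

lemma pv_empty_append {γ : Type} (l : List γ) : (PySem.Set.empty : PySem.Set γ) ++ l = l := rfl

lemma pv_nodup_keys_im (foods : List (List String × List String)) :
    ((PySem.List.enumerate foods 0).foldl pvIngFold PySem.Dict.empty).keys.Nodup := by
  rw [show ((PySem.List.enumerate foods 0).foldl pvIngFold PySem.Dict.empty)
      = ((PySem.List.enumerate foods 0).foldl (fun d p => p.2.1.foldl
          (fun d y => d.modify y PySem.Set.empty (fun s => PySem.Set.add s p.1)) d) PySem.Dict.empty) from rfl]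
  rw [pv_keys_fold _ (fun f => f.1) PySem.Dict.empty, PySem.Dict.keys_empty]
  exact pv_nodup_fold_update _ _ _ List.nodup_nil

-- ===== VERDICT (by name: the statement is the Claim_ definition above) =====
theorem find_inert_ingredients_spec : Claim_equal_find_inert_ingredients := by
  unfold Claim_equal_find_inert_ingredients
  intro foods _
  unfold Spec_find_inert_ingredients
  simp only [find_inert_ingredients, find_inert_ingredients_alt]
  rw [pv_split_A, pv_split_B]
  dsimp only
  rw [PySem.Dict.items_eq_map_keys _ (pv_nodup_keys_im foods) PySem.Set.empty]
  rw [pv_phase2 _ _ 0 PySem.Set.empty (by intro q hq; simp [PySem.Set.empty])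
      (by have h := pv_nodup_keys_im foods
          simpa [List.map_map, Function.comp_def] using h)]
  simp only [List.filter_map, List.map_map, zero_add, Function.comp_def, pv_empty_append]
  have hfilt : ((PySem.List.enumerate foods 0).foldl pvIngFold PySem.Dict.empty).keys.filter
        (fun k => !((PySem.List.enumerate foods 0).foldl pvAllFold PySem.Dict.empty).values.any
          (fun a_foods => pvPresent a_foods
            (((PySem.List.enumerate foods 0).foldl pvIngFold PySem.Dict.empty).getD k PySem.Set.empty)))
      = (foods.foldl pvOccFold PySem.Dict.empty).keys.filter
        (fun ingredient => !(PySem.Set.contains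
            ((foods.foldl pvCandFold PySem.Dict.empty).values.foldl
              (fun s t => PySem.Set.union s t) PySem.Set.empty) ingredient)) := by
    rw [← pv_keys_eq foods]
    refine List.filter_congr ?_
    intro k _
    rw [pv_pred_eq foods k]
  rw [hfilt]
  simp only [List.map_id']
  rw [Prod.mk.injEq]
  refine ⟨?_, rfl⟩
  exact congrArg List.sum (List.map_congr_left (fun k _ => pv_len_eq foods k))
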